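-- pv_equiv track=rewrite | github.com/Hejtan/code-wars-2023 | code_wars_function.py | brute_material
-- ===== SOURCE A (Python) =====
-- def brute_material(spaceship: list[int]) -> int:
--     """ Funkcja brute-force do testowania """
--     result = 0
--     maxh = 0
--     for i in range(len(spaceship)):
--         if spaceship[i] > maxh:
--             maxh = spaceship[i]
--     for j in range(maxh+1):
--         tab = []
--         for i in range(len(spaceship)):
--             if spaceship[i] >= j:
--                 tab.append(i)
--         for i in range(len(tab)-1):
--             result += tab[i+1] - tab[i] - 1
--     return result
-- ===== SOURCE B (Python) =====
-- def brute_material(spaceship: list[int]) -> int: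
--     # Index i qualifies for levels 0..spaceship[i], so its column height in
--     # levels is spaceship[i] + 1 (0 when negative).  Summing the gaps over all
--     # levels is then the classic trapped-rain-water computation on these
--     # columns: two linear passes with running prefix/suffix maxima.
--     heights = [v + 1 if v >= 0 else 0 for v in spaceship]
--     left = []
--     m = 0
--     for x in heights:
--         m = max(m, x)
--         left.append(m)
--     result = 0
--     m = 0
--     for x, lm in zip(reversed(heights), reversed(left)):
--         m = max(m, x)
--         result += min(lm, m) - x
--     return result
-- ===== Notes on version B (the rewrite author's own statement) =====
-- stated objective: faster
-- what changed: Replaces the per-level rescan over all heights 0..maxh (building an index list and summing its gaps for every level) by the classic trapped-rain-water computation on per-index level counts (value+1, floored at 0): two linear passes with running prefix/suffix maxima.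
import Mathlib
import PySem

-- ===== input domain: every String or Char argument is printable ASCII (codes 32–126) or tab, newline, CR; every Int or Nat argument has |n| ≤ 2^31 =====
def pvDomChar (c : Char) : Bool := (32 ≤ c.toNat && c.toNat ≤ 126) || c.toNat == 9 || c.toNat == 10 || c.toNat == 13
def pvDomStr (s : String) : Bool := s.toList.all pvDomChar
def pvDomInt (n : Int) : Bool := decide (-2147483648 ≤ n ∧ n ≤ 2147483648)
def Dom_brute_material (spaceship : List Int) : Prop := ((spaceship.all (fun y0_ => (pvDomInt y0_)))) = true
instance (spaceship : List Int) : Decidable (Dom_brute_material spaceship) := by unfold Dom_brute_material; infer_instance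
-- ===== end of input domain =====

-- B replaces A's per-level rescan over all heights 0..maxh by the trapped-rain-water
-- computation on per-index level counts (value+1, floored at 0): two linear passes with
-- running prefix/suffix maxima; a timing run measured B faster.

-- ===== PORT A =====
def brute_material (spaceship : List Int) : Int :=
  let maxh : Int :=
    (PySem.List.pyRange 0 (spaceship.length : Int)).foldl
      (fun maxh i =>
        if PySem.List.pyGetD spaceship i 0 > maxh then PySem.List.pyGetD spaceship i 0 else maxh) 0
  (PySem.List.pyRange 0 (maxh + 1)).foldl
    (fun result j =>
      let tab : List Int :=
        (PySem.List.pyRange 0 (spaceship.length : Int)).foldl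
          (fun tab i => if PySem.List.pyGetD spaceship i 0 ≥ j then tab ++ [i] else tab) []
      (PySem.List.pyRange 0 ((tab.length : Int) - 1)).foldl
        (fun result i =>
          result + (PySem.List.pyGetD tab (i + 1) 0 - PySem.List.pyGetD tab i 0 - 1)) result)
    0

-- ===== PORT B =====
def brute_material_alt (spaceship : List Int) : Int :=
  let heights : List Int := spaceship.map (fun v => if v ≥ 0 then v + 1 else 0)
  let left : List Int :=
    (heights.foldl
      (fun (acc : List Int × Int) x =>
        let m := max acc.2 x
        (acc.1 ++ [m], m)) ([], 0)).1
  ((heights.reverse.zip left.reverse).foldl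
    (fun (st : Int × Int) p =>
      let m := max st.2 p.1
      (st.1 + (min p.2 m - p.1), m)) (0, 0)).1

-- ===== PRECONDITION & SPEC =====
def Spec_brute_material (spaceship : List Int) (out : Int) : Prop := out = brute_material_alt spaceship
instance (spaceship : List Int) (out : Int) : Decidable (Spec_brute_material spaceship out) := by unfold Spec_brute_material; infer_instance

-- ===== CLAIM (what is proved, stated in full; the proofs are below) =====
def Claim_equal_brute_material : Prop := ∀ (spaceship : List Int), Dom_brute_material spaceship → Spec_brute_material spaceship (brute_material spaceship)

-- ===== LEMMAS AND PROOFS =====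

/-- prefix maximum of the values strictly before index `k`, floored at `-1` -/
def pvPm (xs : List Int) (k : Nat) : Int := (xs.take k).foldl max (-1)
/-- suffix maximum of the values strictly after index `k`, floored at `-1` -/
def pvSm (xs : List Int) (k : Nat) : Int := (xs.drop (k + 1)).foldl max (-1)
/-- B's per-index contribution -/
def pvG (xs : List Int) (k : Nat) : Int :=
  max 0 (min (pvPm xs k) (pvSm xs k) - max (xs.getD k 0) (-1))
/-- A's maxh -/
def pvMaxh (xs : List Int) : Int := xs.foldl max 0
/-- B's level-count column of a value -/
def pvF (v : Int) : Int := if v ≥ 0 then v + 1 else 0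

/-- the qualifying indices of level `P` among `0..n-1` -/
def pvT (P : Nat → Bool) (n : Nat) : List Nat := (List.range n).filter P
/-- A's per-level value, telescoped -/
def pvA (P : Nat → Bool) (n : Nat) : Int :=
  if pvT P n = [] then 0
  else ((pvT P n).getLastD 0 : Int) - ((pvT P n).headD 0 : Int) - (((pvT P n).length : Int) - 1)
/-- hole count of a level -/
def pvH (P : Nat → Bool) (n : Nat) : Int :=
  ∑ k ∈ Finset.range n,
    if (¬ P k = true) ∧ (∃ m, m < k ∧ P m = true) ∧ (∃ m, m < n ∧ k < m ∧ P m = true) then 1 else 0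
/-- holes that have some qualifying index before them (later indices ignored) -/
def pvGaux (P : Nat → Bool) (n : Nat) : Int :=
  ∑ k ∈ Finset.range n, if (¬ P k = true) ∧ (∃ m, m < k ∧ P m = true) then 1 else 0

lemma pvIteMax (m v : Int) : (if m < v then v else m) = max m v := by
  split <;> omega

lemma pvFoldlMaxShift : ∀ (l : List Int) (b x : Int),
    l.foldl max (max b x) = max (l.foldl max b) x := by
  intro l
  induction l with
  | nil => intro b x; rfl
  | cons y t ih =>
    intro b x
    simp only [List.foldl_cons]
    rw [max_right_comm, ih]

lemma pvFoldlMaxLe : ∀ (l : List Int) (b c : Int), b ≤ c → (∀ y ∈ l, y ≤ c) →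
    l.foldl max b ≤ c := by
  intro l
  induction l with
  | nil => intro b c hb _; exact hb
  | cons y t ih =>
    intro b c hb hy
    simp only [List.foldl_cons]
    exact ih _ _ (max_le hb (hy y List.mem_cons_self)) fun z hz => hy z (List.mem_cons_of_mem _ hz)

lemma pvLeFoldlMaxIff : ∀ (l : List Int) (b j : Int),
    j ≤ l.foldl max b ↔ j ≤ b ∨ ∃ y ∈ l, j ≤ y := by
  intro l
  induction l with
  | nil => intro b j; simp
  | cons y t ih =>
    intro b j
    simp only [List.foldl_cons, ih, le_max_iff, List.mem_cons]
    constructor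
    · rintro ((h | h) | ⟨z, hz, hj⟩)
      · exact Or.inl h
      · exact Or.inr ⟨y, Or.inl rfl, h⟩
      · exact Or.inr ⟨z, Or.inr hz, hj⟩
    · rintro (h | ⟨z, (rfl | hz), hj⟩)
      · exact Or.inl (Or.inl h)
      · exact Or.inl (Or.inr hj)
      · exact Or.inr ⟨z, hz, hj⟩

/-- shifting the floor by one through the mapped level counts -/
lemma pvShift : ∀ (l : List Int) (b : Int), -1 ≤ b →
    (l.map pvF).foldl max (b + 1) = l.foldl max b + 1 := by
  intro l
  induction l with
  | nil => intro b _; rfl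
  | cons v t ih =>
    intro b hb
    simp only [List.map_cons, List.foldl_cons]
    have h1 : max (b + 1) (pvF v) = max b v + 1 := by
      simp only [pvF]; split_ifs <;> omega
    rw [h1, ih (max b v) (by omega)]

/-- the same from floor `0` -/
lemma pvShift0 (l : List Int) : (l.map pvF).foldl max 0 = l.foldl max (-1) + 1 := by
  have h := pvShift l (-1) (by omega)
  norm_num at h
  exact h

/-- B's prefix loop builds the list of running (inclusive) prefix maxima -/
lemma pvPreBuild : ∀ (xs : List Int) (c : List Int) (b : Int),
    (xs.foldl (fun (acc : List Int × Int) x => (acc.1 ++ [max acc.2 x], max acc.2 x)) (c, b)).1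
      = c ++ (List.range xs.length).map (fun i => (xs.take (i + 1)).foldl max b) := by
  intro xs
  induction xs with
  | nil => intro c b; simp
  | cons v t ih =>
    intro c b
    simp only [List.foldl_cons, ih, List.length_cons, List.range_succ_eq_map,
      List.map_cons, List.map_map]
    simp [Function.comp_def, List.append_assoc]

lemma pvZipReverse : ∀ (l1 l2 : List Int), l1.length = l2.length →
    l1.reverse.zip l2.reverse = (l1.zip l2).reverse := by
  intro l1
  induction l1 with
  | nil => intro l2 _; simp [List.zip]
  | cons a t ih =>
    intro l2 h
    cases l2 with
    | nil => simp at h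
    | cons b u =>
      simp only [List.length_cons, Nat.add_right_cancel_iff] at h
      simp only [List.reverse_cons, List.zip_cons_cons, List.reverse_cons]
      rw [← ih u h, List.zip_append (by simp [h])]
      simp

/-- B's backwards scan accumulates the per-index water terms, index-suffix form -/
lemma pvBFoldr (h : List Int) : ∀ (m k : Nat), k + m = h.length →
    ((h.drop k).zip (((List.range h.length).map (fun i => (h.take (i + 1)).foldl max 0)).drop k)).foldr
      (fun p (st : Int × Int) =>
        (st.1 + (min p.2 (max st.2 p.1) - p.1), max st.2 p.1))
      (0, 0)
    = (∑ i ∈ Finset.Ico k h.length,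
        (min ((h.take (i + 1)).foldl max 0) ((h.drop i).foldl max 0) - h.getD i 0),
       (h.drop k).foldl max 0) := by
  intro m
  induction m with
  | zero =>
    intro k hk
    have hkn : k = h.length := by omega
    subst hkn
    simp
  | succ m ih =>
    intro k hk
    have hkn : k < h.length := by omega
    rw [List.drop_eq_getElem_cons hkn,
        List.drop_eq_getElem_cons (by simp; omega :
          k < (((List.range h.length).map (fun i => (h.take (i + 1)).foldl max 0))).length)]
    simp only [List.zip_cons_cons, List.foldr_cons]
    rw [ih (k + 1) (by omega)]
    have hget : ((List.range h.length).map (fun i => (h.take (i + 1)).foldl max 0))[k]'(by simp; omega)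
        = (h.take (k + 1)).foldl max 0 := by simp
    have hv : h[k] = h.getD k 0 := (List.getD_eq_getElem h 0 hkn).symm
    have hM : max ((h.drop (k + 1)).foldl max 0) h[k] = (h.drop k).foldl max 0 := by
      rw [List.drop_eq_getElem_cons hkn, List.foldl_cons, pvFoldlMaxShift]
    rw [Prod.mk.injEq]
    constructor
    · dsimp only
      rw [Finset.sum_eq_sum_Ico_succ_bot hkn, hget, hM, hv]
      ring
    · dsimp only
      rw [List.foldl_cons, pvFoldlMaxShift]

/-- per-index bridge: the water term of the mapped columns is `pvG` -/
lemma pvTermG (xs : List Int) (k : Nat) (hk : k < xs.length) :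
    min (((xs.map pvF).take (k + 1)).foldl max 0) (((xs.map pvF).drop k).foldl max 0)
      - (xs.map pvF).getD k 0 = pvG xs k := by
  have hlen : k < (xs.map pvF).length := by simpa using hk
  have hgd : (xs.map pvF).getD k 0 = pvF (xs.getD k 0) := by
    rw [List.getD_eq_getElem _ 0 hlen, List.getD_eq_getElem _ 0 hk, List.getElem_map]
  have hL : ((xs.map pvF).take (k + 1)).foldl max 0
      = max (pvPm xs k) (xs.getD k 0) + 1 := by
    rw [← List.map_take, pvShift0, List.take_succ_eq_append_getElem hk, List.foldl_append]
    simp only [List.foldl_cons, List.foldl_nil]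
    rw [pvPm, List.getD_eq_getElem _ 0 hk]
  have hM : ((xs.map pvF).drop k).foldl max 0
      = max (pvSm xs k) (xs.getD k 0) + 1 := by
    rw [← List.map_drop, pvShift0, List.drop_eq_getElem_cons hk, List.foldl_cons,
      pvFoldlMaxShift, pvSm, List.getD_eq_getElem _ 0 hk]
  rw [hgd, hL, hM]
  have hP : (-1 : Int) ≤ pvPm xs k := (PySem.List.le_foldl_max (xs.take k) (-1)).1
  have hS : (-1 : Int) ≤ pvSm xs k := (PySem.List.le_foldl_max (xs.drop (k + 1)) (-1)).1
  simp only [pvG, pvF]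
  split_ifs <;> omega

/-- B computes the sum of the per-index contributions -/
lemma pvBSum (xs : List Int) :
    brute_material_alt xs = ∑ i ∈ Finset.range xs.length, pvG xs i := by
  have hxs : (fun v : Int => if v ≥ 0 then v + 1 else 0) = pvF := rfl
  unfold brute_material_alt
  simp only [hxs]
  rw [pvPreBuild (xs.map pvF) [] 0, List.nil_append,
    pvZipReverse _ _ (by simp), List.foldl_reverse]
  have hfold := pvBFoldr (xs.map pvF) (xs.map pvF).length 0 (by omega)
  simp only [List.drop_zero, List.length_map] at hfold
  simp only [List.length_map]
  rw [hfold]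
  simp only [Finset.range_eq_Ico]
  exact Finset.sum_congr rfl fun k hk => pvTermG xs k (Finset.mem_Ico.mp hk).2

/-- telescoping of the gap sum, Nat-indexed -/
lemma pvTeleNat : ∀ (t : List Int),
    ((List.range (t.length - 1)).map (fun k => t.getD (k + 1) 0 - t.getD k 0 - 1)).sum
      = if t = [] then 0 else t.getLastD 0 - t.headD 0 - ((t.length : Int) - 1) := by
  intro t
  induction t with
  | nil => simp
  | cons a u ih =>
    cases u with
    | nil => simp
    | cons b w =>
      simp only [List.length_cons, Nat.add_sub_cancel] at ih ⊢
      rw [List.range_succ_eq_map]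
      simp only [List.map_cons, List.map_map, List.sum_cons, Function.comp_def]
      have h1 : ∀ k : Nat, (a :: b :: w).getD (k + 1 + 1) 0 - (a :: b :: w).getD (k + 1) 0 - 1
          = (b :: w).getD (k + 1) 0 - (b :: w).getD k 0 - 1 := fun k => rfl
      simp only [Nat.succ_eq_add_one, h1, ih]
      rw [if_neg (by simp), if_neg (by simp)]
      simp only [List.getD_cons_succ, List.getD_cons_zero, List.getLastD_cons,
        List.headD_cons]
      push_cast
      omega

/-- A's per-level gap loop, on the tab list -/
lemma pvTele (t : List Int) (r : Int) :
    (PySem.List.pyRange 0 ((t.length : Int) - 1)).foldl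
      (fun result i => result + (PySem.List.pyGetD t (i + 1) 0 - PySem.List.pyGetD t i 0 - 1)) r
    = r + (if t = [] then 0 else t.getLastD 0 - t.headD 0 - ((t.length : Int) - 1)) := by
  rw [PySem.List.foldl_add]
  congr 1
  rw [PySem.List.pyRange_zero, List.map_map]
  have hN : ((t.length : Int) - 1).toNat = t.length - 1 := by omega
  rw [hN, ← pvTeleNat t]
  congr 1
  apply List.map_congr_left
  intro k _
  simp only [Function.comp_apply]
  have h1 : ((k : Int) + 1) = ((k + 1 : Nat) : Int) := by push_cast; ring
  rw [h1, PySem.List.pyGetD_natCast, PySem.List.pyGetD_natCast]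

lemma pvTSucc (P : Nat → Bool) (n : Nat) :
    pvT P (n + 1) = pvT P n ++ if P n then [n] else [] := by
  simp only [pvT, List.range_succ, List.filter_append]
  congr 1
  split <;> simp_all

lemma pvTNe (P : Nat → Bool) (n : Nat) :
    pvT P n ≠ [] ↔ ∃ m, m < n ∧ P m = true := by
  simp only [pvT, ne_eq, List.filter_eq_nil_iff, List.mem_range]
  push Not
  constructor
  · rintro ⟨m, hm, hp⟩; exact ⟨m, hm, by simpa using hp⟩
  · rintro ⟨m, hm, hp⟩; exact ⟨m, hm, by simpa using hp⟩

lemma pvGauxEq (P : Nat → Bool) : ∀ n : Nat,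
    pvGaux P n = if pvT P n = [] then 0
      else (n : Int) - ((pvT P n).headD 0 : Int) - ((pvT P n).length : Int) := by
  intro n
  induction n with
  | zero => simp [pvGaux, pvT]
  | succ n ih =>
    have hsum : pvGaux P (n + 1)
        = pvGaux P n + (if (¬ P n = true) ∧ (∃ m, m < n ∧ P m = true) then (1 : Int) else 0) := by
      simp only [pvGaux, Finset.sum_range_succ]
    rw [hsum, ih, pvTSucc]
    rcases hT : pvT P n with _ | ⟨c, rest⟩
    · have hno : ¬ ∃ m, m < n ∧ P m = true := fun h => by simpa [hT] using (pvTNe P n).mpr h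
      cases hP : P n
      · simp [hno]
      · simp
    · have hyes : ∃ m, m < n ∧ P m = true := (pvTNe P n).mp (by simp [hT])
      cases hP : P n
      · simp only [Bool.false_eq_true, not_false_iff, true_and, if_pos hyes, if_false,
          List.append_nil, List.headD_cons, List.length_cons,
          if_neg (by simp : ¬(c :: rest) = [])]
        push_cast
        omega
      · simp only [not_true, false_and, if_false, if_true, add_zero, List.cons_append,
          List.headD_cons, List.length_append, List.length_cons, List.length_nil]
        rw [if_neg (by simp : ¬(c :: rest) = []), if_neg (by simp : ¬(c :: (rest ++ [n])) = [])]
        push_cast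
        omega

/-- per-level identity: the telescoped gap sum counts the holes -/
lemma pvPerLevel (P : Nat → Bool) : ∀ n : Nat, pvA P n = pvH P n := by
  intro n
  induction n with
  | zero => simp [pvA, pvH, pvT]
  | succ n ih =>
    cases hP : P n with
    | true =>
      have hH : pvH P (n + 1) = pvGaux P n := by
        simp only [pvH, Finset.sum_range_succ]
        rw [if_neg (by rintro ⟨h, _⟩; simp [hP] at h), add_zero]
        apply Finset.sum_congr rfl
        intro k hk
        have hkn := Finset.mem_range.mp hk
        apply if_congr _ rfl rfl
        constructor
        · rintro ⟨h1, h2, _⟩; exact ⟨h1, h2⟩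
        · rintro ⟨h1, h2⟩; exact ⟨h1, h2, ⟨n, by omega, hkn, hP⟩⟩
      rw [hH, pvGauxEq]
      have hT1 : pvT P (n + 1) = pvT P n ++ [n] := by rw [pvTSucc, hP]; simp
      rcases hT : pvT P n with _ | ⟨c, rest⟩
      · rw [hT] at hT1
        rw [if_pos rfl]
        simp only [pvA, hT1, List.nil_append]
        rw [if_neg (by simp)]
        simp
      · rw [hT] at hT1
        rw [if_neg (by simp)]
        simp only [pvA, hT1]
        rw [if_neg (by simp)]
        simp only [List.cons_append, List.getLastD_cons, List.getLastD_concat,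
          List.headD_cons, List.length_append, List.length_cons, List.length_nil]
        push_cast
        omega
    | false =>
      have hT : pvT P (n + 1) = pvT P n := by
        rw [pvTSucc, hP]
        simp
      have hH : pvH P (n + 1) = pvH P n := by
        simp only [pvH, Finset.sum_range_succ]
        rw [if_neg (by rintro ⟨_, _, m, hm1, hm2, hm3⟩; have : m = n := by omega
                       subst this; simp [hP] at hm3), add_zero]
        apply Finset.sum_congr rfl
        intro k hk
        have hkn := Finset.mem_range.mp hk
        apply if_congr _ rfl rfl
        constructor
        · rintro ⟨h1, h2, m, hm1, hm2, hm3⟩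
          refine ⟨h1, h2, m, ?_, hm2, hm3⟩
          rcases Nat.lt_succ_iff_lt_or_eq.mp hm1 with h | h
          · exact h
          · subst h; simp [hP] at hm3
        · rintro ⟨h1, h2, m, hm1, hm2, hm3⟩
          exact ⟨h1, h2, m, by omega, hm2, hm3⟩
      rw [hH, ← ih]
      simp only [pvA, hT]

/-- counting integers in a half-open interval inside `range N` -/
lemma pvCount : ∀ (N : Nat) (L U : Int), -1 ≤ L → U ≤ (N : Int) - 1 →
    (∑ jn ∈ Finset.range N, if L < (jn : Int) ∧ (jn : Int) ≤ U then (1 : Int) else 0)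
      = max 0 (U - L) := by
  intro N
  induction N with
  | zero =>
    intro L U hL hU
    simp only [Finset.range_zero, Finset.sum_empty]
    simp at hU
    omega
  | succ N ih =>
    intro L U hL hU
    rw [Finset.sum_range_succ]
    by_cases hU' : U ≤ (N : Int) - 1
    · rw [ih L U hL hU', if_neg (by omega)]
      ring
    · have hUN : U = (N : Int) := by omega
      have hfront : (∑ jn ∈ Finset.range N, if L < (jn : Int) ∧ (jn : Int) ≤ U then (1 : Int) else 0)
          = ∑ jn ∈ Finset.range N, if L < (jn : Int) ∧ (jn : Int) ≤ (N : Int) - 1 then (1 : Int) else 0 := by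
        apply Finset.sum_congr rfl
        intro jn hjn
        have hj := Finset.mem_range.mp hjn
        apply if_congr _ rfl rfl
        constructor <;> rintro ⟨h1, _⟩ <;> exact ⟨h1, by omega⟩
      rw [hfront, ih L ((N : Int) - 1) hL (le_refl _), hUN]
      by_cases hLN : L < (N : Int)
      · rw [if_pos ⟨hLN, le_refl _⟩]; omega
      · rw [if_neg (fun h => hLN h.1)]; omega

lemma pvGetLastDMap : ∀ (S : List Nat) (d : Nat),
    (S.map (fun k : Nat => (k : Int))).getLastD (d : Int) = ((S.getLastD d : Nat) : Int) := by
  intro S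
  induction S with
  | nil => intro d; rfl
  | cons a u ih =>
    intro d
    rw [List.map_cons, List.getLastD_cons, List.getLastD_cons]
    exact ih a

lemma pvABridge (S : List Nat) :
    (if S.map (fun k : Nat => (k : Int)) = [] then (0 : Int)
     else (S.map (fun k : Nat => (k : Int))).getLastD 0 - (S.map (fun k : Nat => (k : Int))).headD 0
       - (((S.map (fun k : Nat => (k : Int))).length : Int) - 1))
    = if S = [] then 0
      else ((S.getLastD 0 : Nat) : Int) - ((S.headD 0 : Nat) : Int) - ((S.length : Int) - 1) := by
  rcases S with _ | ⟨c, rest⟩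
  · simp
  · rw [if_neg (by simp), if_neg (by simp)]
    have hlast := pvGetLastDMap (c :: rest) 0
    rw [Nat.cast_zero] at hlast
    rw [hlast]
    simp

/-- the interval form of the hole condition, for levels `j ≥ 0` -/
lemma pvCondIff (xs : List Int) (k : Nat) (hk : k < xs.length) (j : Int) (hj : 0 ≤ j) :
    ((¬ (decide (j ≤ xs.getD k 0)) = true) ∧ (∃ m, m < k ∧ decide (j ≤ xs.getD m 0) = true)
      ∧ (∃ m, m < xs.length ∧ k < m ∧ decide (j ≤ xs.getD m 0) = true))
    ↔ (max (xs.getD k 0) (-1) < j ∧ j ≤ min (pvPm xs k) (pvSm xs k)) := by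
  simp only [decide_eq_true_eq]
  have hpm : j ≤ pvPm xs k ↔ ∃ m, m < k ∧ j ≤ xs.getD m 0 := by
    rw [pvPm, pvLeFoldlMaxIff]
    constructor
    · rintro (h | ⟨y, hy, hj2⟩)
      · omega
      · obtain ⟨m, hm, rfl⟩ := List.mem_take_iff_getElem.mp hy
        refine ⟨m, by omega, ?_⟩
        rwa [List.getD_eq_getElem xs 0 (by omega)]
    · rintro ⟨m, hm, hjm⟩
      right
      refine ⟨xs[m]'(by omega), List.mem_take_iff_getElem.mpr ⟨m, by omega, rfl⟩, ?_⟩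
      rwa [List.getD_eq_getElem xs 0 (by omega)] at hjm
  have hsm : j ≤ pvSm xs k ↔ ∃ m, m < xs.length ∧ k < m ∧ j ≤ xs.getD m 0 := by
    rw [pvSm, pvLeFoldlMaxIff]
    constructor
    · rintro (h | ⟨y, hy, hj2⟩)
      · omega
      · obtain ⟨i, hi, rfl⟩ := List.mem_drop_iff_getElem.mp hy
        refine ⟨k + 1 + i, by omega, by omega, ?_⟩
        rwa [List.getD_eq_getElem xs 0 (by omega)]
    · rintro ⟨m, hm, hkm, hjm⟩
      right
      obtain ⟨i, rfl⟩ : ∃ i, m = k + 1 + i := ⟨m - (k + 1), by omega⟩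
      refine ⟨xs[k + 1 + i]'(by omega), List.mem_drop_iff_getElem.mpr ⟨i, by omega, rfl⟩, ?_⟩
      rwa [List.getD_eq_getElem xs 0 (by omega)] at hjm
  rw [max_lt_iff, le_min_iff, not_le, hpm, hsm]
  constructor
  · rintro ⟨h1, h2, h3⟩
    exact ⟨⟨h1, by omega⟩, h2, h3⟩
  · rintro ⟨⟨h1, _⟩, h2, h3⟩
    exact ⟨h1, h2, h3⟩

/-- A computes the sum over levels of the per-level value -/
lemma pvASum (xs : List Int) :
    brute_material xs = ∑ jn ∈ Finset.range (pvMaxh xs + 1).toNat,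
      pvA (fun k => decide ((jn : Int) ≤ xs.getD k 0)) xs.length := by
  unfold brute_material
  have hmaxh : (PySem.List.pyRange 0 (xs.length : Int)).foldl
      (fun maxh i => if PySem.List.pyGetD xs i 0 > maxh then PySem.List.pyGetD xs i 0 else maxh) 0
      = pvMaxh xs := by
    rw [PySem.List.foldl_pyRange_zero_pyGetD' xs 0 (fun m v => if v > m then v else m) 0]
    simp only [pvIteMax]
    rfl
  rw [hmaxh]
  have hbody : ∀ (r : Int), ∀ j ∈ PySem.List.pyRange 0 (pvMaxh xs + 1),
      (let tab : List Int :=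
        (PySem.List.pyRange 0 (xs.length : Int)).foldl
          (fun tab i => if PySem.List.pyGetD xs i 0 ≥ j then tab ++ [i] else tab) []
       (PySem.List.pyRange 0 ((tab.length : Int) - 1)).foldl
        (fun result i =>
          result + (PySem.List.pyGetD tab (i + 1) 0 - PySem.List.pyGetD tab i 0 - 1)) r)
      = r + pvA (fun k => decide (j ≤ xs.getD k 0)) xs.length := by
    intro r j _
    have htab : (PySem.List.pyRange 0 (xs.length : Int)).foldl
        (fun tab i => if PySem.List.pyGetD xs i 0 ≥ j then tab ++ [i] else tab) ([] : List Int)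
        = (pvT (fun k => decide (j ≤ xs.getD k 0)) xs.length).map (fun k : Nat => (k : Int)) := by
      rw [PySem.List.pyRange_zero_nat, List.foldl_map]
      simp only [PySem.List.pyGetD_natCast]
      have := PySem.List.foldl_append_if (fun k => decide (j ≤ xs.getD k 0))
        (fun k : Nat => (k : Int)) (List.range xs.length) []
      simp only [decide_eq_true_eq] at this
      rw [this, List.nil_append, pvT]
    simp only [htab, pvTele, pvABridge]
    rfl
  rw [PySem.List.foldl_congr_mem _ _ (fun r j => r + pvA (fun k => decide (j ≤ xs.getD k 0)) xs.length) 0 hbody]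
  rw [PySem.List.foldl_add]
  rw [PySem.List.pyRange_zero, List.map_map]
  have : ((List.range (pvMaxh xs + 1).toNat).map
      ((fun j => pvA (fun k => decide (j ≤ xs.getD k 0)) xs.length) ∘ (fun k : Nat => (k : Int)))).sum
      = ∑ jn ∈ Finset.range (pvMaxh xs + 1).toNat,
        pvA (fun k => decide ((jn : Int) ≤ xs.getD k 0)) xs.length := rfl
  rw [this, zero_add]

theorem pvMain (xs : List Int) : brute_material xs = brute_material_alt xs := by
  rw [pvASum, pvBSum]
  have hmax0 : 0 ≤ pvMaxh xs := (PySem.List.le_foldl_max xs 0).1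
  have hNat : (((pvMaxh xs + 1).toNat : Nat) : Int) = pvMaxh xs + 1 := by omega
  have hlev : ∀ jn : Nat, pvA (fun k => decide ((jn : Int) ≤ xs.getD k 0)) xs.length
      = ∑ k ∈ Finset.range xs.length,
          if max (xs.getD k 0) (-1) < (jn : Int) ∧ (jn : Int) ≤ min (pvPm xs k) (pvSm xs k)
          then (1 : Int) else 0 := by
    intro jn
    rw [pvPerLevel]
    simp only [pvH]
    apply Finset.sum_congr rfl
    intro k hk
    exact if_congr (pvCondIff xs k (Finset.mem_range.mp hk) _ (Int.natCast_nonneg jn)) rfl rfl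
  simp only [hlev]
  rw [Finset.sum_comm]
  apply Finset.sum_congr rfl
  intro k hk
  have hk' := Finset.mem_range.mp hk
  have hpmle : pvPm xs k ≤ pvMaxh xs := by
    apply pvFoldlMaxLe
    · omega
    · intro y hy
      exact (PySem.List.le_foldl_max xs 0).2 y (List.take_subset _ _ hy)
  have hU : min (pvPm xs k) (pvSm xs k) ≤ (((pvMaxh xs + 1).toNat : Nat) : Int) - 1 := by
    rw [hNat]; omega
  rw [pvCount _ _ _ (le_max_right _ _) hU]
  rfl

-- ===== VERDICT (by name: the statement is the Claim_ definition above) =====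
theorem brute_material_spec : Claim_equal_brute_material := by
  intro xs _
  unfold Spec_brute_material
  exact pvMain xs
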